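-- pv_equiv track=rewrite | github.com/cnshiyi/shop | bot/handlers.py | _callback_route_label
-- ===== SOURCE A (Python) =====
-- def _callback_route_label(callback_data: str | None) -> str:
--     data = callback_data or ''
--     exact = {
--         'cloud:querymenu': 'cloud.querymenu 到期时间查询菜单',
--         'cloud:list': 'cloud.list 代理列表',
--         'cloud:autorenewlist': 'cloud.autorenewlist 自动续费列表',
--         'cloud:queryip': 'cloud.queryip IP查询到期',
--         'profile:orders': 'profile.orders 订单查询入口',
--         'profile:orders:cloud': 'profile.orders.cloud 云服务器订单',
--         'profile:cart': 'profile.cart 购物车入口',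
--         'profile:balance_details': 'profile.balance_details 余额明细',
--         'profile:reminders': 'profile.reminders 提醒列表',
--         'profile:reminders:muteall': 'profile.reminders.mute_all 一键关闭所有提醒',
--         'profile:reminders:unmuteall': 'profile.reminders.unmute_all 一键开启全部提醒',
--         'profile:reminders:page': 'profile.reminders.page 提醒列表分页',
--         'profile:back_to_menu': 'profile.back_to_menu 返回个人中心',
--         'profile:back': 'profile.back 返回主菜单',
--         'profile:recharge': 'profile.recharge 充值余额',
--         'profile:recharges': 'profile.recharges 充值记录',
--         'profile:monitors': 'profile.monitors 地址监控',
--         'custom:back': 'custom.back 返回主菜单',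
--         'custom:regions': 'custom.regions 定制地区',
--         'custom:regions:more': 'custom.regions.more 更多地区',
--         'mon:add': 'monitor.add 添加监控',
--         'mon:list': 'monitor.list 监控列表',
--         'mon:back': 'monitor.back 返回监控列表',
--         'noop': 'noop 无操作',
--     }
--     if data in exact:
--         return exact[data]
--     prefixes = [
--         ('cloud:orderdetail:', 'cloud.orderdetail 云订单详情'),
--         ('cloud:assetreinitconfirm:', 'cloud.assetreinitconfirm 确认资产重建'),
--         ('cloud:assetinit:', 'cloud.assetinit 资产重新安装'),
--         ('cloud:assetaction:', 'cloud.assetaction 资产操作'),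
--         ('cloud:assetdetail:', 'cloud.assetdetail 人工代理详情'),
--         ('cloud:detail:', 'cloud.detail 代理详情'),
--         ('cloud:list:page:', 'cloud.list.page 代理列表分页'),
--         ('cloud:autorenewlist:all:', 'cloud.autorenewlist.all 自动续费批量开关'),
--         ('cloud:autorenewlist:page:', 'cloud.autorenewlist.page 自动续费列表分页'),
--         ('cloud:autorenewlist:on:', 'cloud.autorenewlist.on 开启自动续费'),
--         ('cloud:autorenewlist:off:', 'cloud.autorenewlist.off 关闭自动续费'),
--         ('cloud:queryip:page:', 'cloud.queryip.page IP查询分页'),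
--         ('cloud:renewpay:', 'cloud.renewpay 续费钱包支付'),
--         ('cloud:renewwallet:', 'cloud.renewwallet 自动续费钱包支付'),
--         ('cloud:renew:', 'cloud.renew 续费'),
--         ('cloud:start:', 'cloud.start 管理员开机'),
--         ('cloud:autorenew:', 'cloud.autorenew 自动续费开关'),
--         ('cloud:delay:', 'cloud.delay 延期'),
--         ('cloud:mute:', 'cloud.mute 关闭提醒'),
--         ('cloud:ipport:default:', 'cloud.ipport.default 更换IP默认端口'),
--         ('cloud:ipport:custom:', 'cloud.ipport.custom 更换IP自定义端口'),
--         ('cloud:ipregions:more:', 'cloud.ipregions.more 更换IP更多地区'),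
--         ('cloud:ipregion:', 'cloud.ipregion 更换IP选地区'),
--         ('cloud:ip:', 'cloud.ip 更换IP'),
--         ('cloud:upgradepay:', 'cloud.upgradepay 升级支付'),
--         ('cloud:upgrade:', 'cloud.upgrade 升级配置'),
--         ('cloud:refundyes:', 'cloud.refundyes 确认退款'),
--         ('cloud:refund:', 'cloud.refund 退款确认'),
--         ('cloud:reinitconfirm:', 'cloud.reinitconfirm 确认重新初始化'),
--         ('cloud:reinit:', 'cloud.reinit 重新安装/继续初始化'),
--         ('profile:orders:cloud:page:', 'profile.orders.cloud.page 云服务器订单分页'),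
--         ('profile:reminders:ip:', 'profile.reminders.ip IP提醒详情'),
--         ('profile:reminders:order:', 'profile.reminders.order 单IP生命周期提醒开关'),
--         ('profile:reminders:auto:', 'profile.reminders.auto 单IP自动续费开关'),
--         ('profile:reminders:page:', 'profile.reminders.page 提醒列表分页'),
--         ('custom:region:', 'custom.region 选择地区'),
--         ('custom:plan:', 'custom.plan 选择套餐'),
--         ('custom:qty:', 'custom.qty 选择数量'),
--         ('custom:paypage:', 'custom.paypage 支付页'),
--         ('custom:qtycart:', 'custom.qtycart 加入购物车'),
--         ('custom:walletpay:', 'custom.walletpay 钱包补付'),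
--         ('custom:wallet:', 'custom.wallet 钱包支付币种'),
--         ('custom:currency:', 'custom.currency 支付币种'),
--         ('custom:balance:', 'custom.balance 钱包支付'),
--         ('custom:port:default:', 'custom.port.default 默认端口'),
--         ('custom:port:custom:', 'custom.port.custom 自定义端口'),
--         ('balance:detail:', 'balance.detail 余额明细详情'),
--         ('rcur:', 'recharge.currency 充值币种'),
--         ('rpage:', 'recharge.page 充值分页'),
--         ('rdetail:', 'recharge.detail 充值详情'),
--         ('mon:detail:', 'monitor.detail 监控详情'),
--         ('mon:toggle:', 'monitor.toggle 监控开关'),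
--         ('mon:threshold:', 'monitor.threshold 设置阈值'),
--         ('mon:setthr:', 'monitor.set_threshold 选择阈值币种'),
--         ('mon:delete:', 'monitor.delete 删除监控'),
--         ('mon:txd:', 'monitor.transfer_detail 转账详情'),
--         ('mon:resd:', 'monitor.resource_detail 资源详情'),
--     ]
--     for prefix, label in prefixes:
--         if data.startswith(prefix):
--             return label
--     return 'callback.unknown 未匹配按钮'
-- ===== SOURCE B (Python) =====
-- # B: one merged route dict keyed by full or ':'-terminated prefix, values as (route, desc) pairs;
-- # lookup = exact probe then hash probes at the input's colon boundaries instead of A's linear scan over 57 prefixes.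
--
-- _ROUTES = {
--     'cloud:querymenu': ('cloud.querymenu', '到期时间查询菜单'),
--     'cloud:list': ('cloud.list', '代理列表'),
--     'cloud:autorenewlist': ('cloud.autorenewlist', '自动续费列表'),
--     'cloud:queryip': ('cloud.queryip', 'IP查询到期'),
--     'profile:orders': ('profile.orders', '订单查询入口'),
--     'profile:orders:cloud': ('profile.orders.cloud', '云服务器订单'),
--     'profile:cart': ('profile.cart', '购物车入口'),
--     'profile:balance_details': ('profile.balance_details', '余额明细'),
--     'profile:reminders': ('profile.reminders', '提醒列表'),
--     'profile:reminders:muteall': ('profile.reminders.mute_all', '一键关闭所有提醒'),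
--     'profile:reminders:unmuteall': ('profile.reminders.unmute_all', '一键开启全部提醒'),
--     'profile:reminders:page': ('profile.reminders.page', '提醒列表分页'),
--     'profile:back_to_menu': ('profile.back_to_menu', '返回个人中心'),
--     'profile:back': ('profile.back', '返回主菜单'),
--     'profile:recharge': ('profile.recharge', '充值余额'),
--     'profile:recharges': ('profile.recharges', '充值记录'),
--     'profile:monitors': ('profile.monitors', '地址监控'),
--     'custom:back': ('custom.back', '返回主菜单'),
--     'custom:regions': ('custom.regions', '定制地区'),
--     'custom:regions:more': ('custom.regions.more', '更多地区'),
--     'mon:add': ('monitor.add', '添加监控'),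
--     'mon:list': ('monitor.list', '监控列表'),
--     'mon:back': ('monitor.back', '返回监控列表'),
--     'noop': ('noop', '无操作'),
--     'cloud:orderdetail:': ('cloud.orderdetail', '云订单详情'),
--     'cloud:assetreinitconfirm:': ('cloud.assetreinitconfirm', '确认资产重建'),
--     'cloud:assetinit:': ('cloud.assetinit', '资产重新安装'),
--     'cloud:assetaction:': ('cloud.assetaction', '资产操作'),
--     'cloud:assetdetail:': ('cloud.assetdetail', '人工代理详情'),
--     'cloud:detail:': ('cloud.detail', '代理详情'),
--     'cloud:list:page:': ('cloud.list.page', '代理列表分页'),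
--     'cloud:autorenewlist:all:': ('cloud.autorenewlist.all', '自动续费批量开关'),
--     'cloud:autorenewlist:page:': ('cloud.autorenewlist.page', '自动续费列表分页'),
--     'cloud:autorenewlist:on:': ('cloud.autorenewlist.on', '开启自动续费'),
--     'cloud:autorenewlist:off:': ('cloud.autorenewlist.off', '关闭自动续费'),
--     'cloud:queryip:page:': ('cloud.queryip.page', 'IP查询分页'),
--     'cloud:renewpay:': ('cloud.renewpay', '续费钱包支付'),
--     'cloud:renewwallet:': ('cloud.renewwallet', '自动续费钱包支付'),
--     'cloud:renew:': ('cloud.renew', '续费'),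
--     'cloud:start:': ('cloud.start', '管理员开机'),
--     'cloud:autorenew:': ('cloud.autorenew', '自动续费开关'),
--     'cloud:delay:': ('cloud.delay', '延期'),
--     'cloud:mute:': ('cloud.mute', '关闭提醒'),
--     'cloud:ipport:default:': ('cloud.ipport.default', '更换IP默认端口'),
--     'cloud:ipport:custom:': ('cloud.ipport.custom', '更换IP自定义端口'),
--     'cloud:ipregions:more:': ('cloud.ipregions.more', '更换IP更多地区'),
--     'cloud:ipregion:': ('cloud.ipregion', '更换IP选地区'),
--     'cloud:ip:': ('cloud.ip', '更换IP'),
--     'cloud:upgradepay:': ('cloud.upgradepay', '升级支付'),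
--     'cloud:upgrade:': ('cloud.upgrade', '升级配置'),
--     'cloud:refundyes:': ('cloud.refundyes', '确认退款'),
--     'cloud:refund:': ('cloud.refund', '退款确认'),
--     'cloud:reinitconfirm:': ('cloud.reinitconfirm', '确认重新初始化'),
--     'cloud:reinit:': ('cloud.reinit', '重新安装/继续初始化'),
--     'profile:orders:cloud:page:': ('profile.orders.cloud.page', '云服务器订单分页'),
--     'profile:reminders:ip:': ('profile.reminders.ip', 'IP提醒详情'),
--     'profile:reminders:order:': ('profile.reminders.order', '单IP生命周期提醒开关'),
--     'profile:reminders:auto:': ('profile.reminders.auto', '单IP自动续费开关'),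
--     'profile:reminders:page:': ('profile.reminders.page', '提醒列表分页'),
--     'custom:region:': ('custom.region', '选择地区'),
--     'custom:plan:': ('custom.plan', '选择套餐'),
--     'custom:qty:': ('custom.qty', '选择数量'),
--     'custom:paypage:': ('custom.paypage', '支付页'),
--     'custom:qtycart:': ('custom.qtycart', '加入购物车'),
--     'custom:walletpay:': ('custom.walletpay', '钱包补付'),
--     'custom:wallet:': ('custom.wallet', '钱包支付币种'),
--     'custom:currency:': ('custom.currency', '支付币种'),
--     'custom:balance:': ('custom.balance', '钱包支付'),
--     'custom:port:default:': ('custom.port.default', '默认端口'),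
--     'custom:port:custom:': ('custom.port.custom', '自定义端口'),
--     'balance:detail:': ('balance.detail', '余额明细详情'),
--     'rcur:': ('recharge.currency', '充值币种'),
--     'rpage:': ('recharge.page', '充值分页'),
--     'rdetail:': ('recharge.detail', '充值详情'),
--     'mon:detail:': ('monitor.detail', '监控详情'),
--     'mon:toggle:': ('monitor.toggle', '监控开关'),
--     'mon:threshold:': ('monitor.threshold', '设置阈值'),
--     'mon:setthr:': ('monitor.set_threshold', '选择阈值币种'),
--     'mon:delete:': ('monitor.delete', '删除监控'),
--     'mon:txd:': ('monitor.transfer_detail', '转账详情'),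
--     'mon:resd:': ('monitor.resource_detail', '资源详情'),
-- }
--
-- _FALLBACK = ('callback.unknown', '未匹配按钮')
--
--
-- def _callback_route_label(callback_data):
--     data = callback_data or ''
--     hit = _ROUTES.get(data)
--     if hit is None:
--         for i, ch in enumerate(data):
--             if ch == ':':
--                 hit = _ROUTES.get(data[:i + 1])
--                 if hit is not None:
--                     break
--     route, desc = hit if hit is not None else _FALLBACK
--     return route + ' ' + desc
-- ===== Notes on version B (the rewrite author's own statement) =====
-- stated objective: alternative
-- what changed: Replaces A's exact-match dict plus linear scan over 57 prefix tuples by one merged route dict whose values are (route, desc) pairs, probed exactly and then by hash lookups at each colon boundary of the input (valid because every prefix pattern ends in a colon and no pattern nests inside another), with the label reassembled as route + ' ' + desc.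
import Mathlib
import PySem

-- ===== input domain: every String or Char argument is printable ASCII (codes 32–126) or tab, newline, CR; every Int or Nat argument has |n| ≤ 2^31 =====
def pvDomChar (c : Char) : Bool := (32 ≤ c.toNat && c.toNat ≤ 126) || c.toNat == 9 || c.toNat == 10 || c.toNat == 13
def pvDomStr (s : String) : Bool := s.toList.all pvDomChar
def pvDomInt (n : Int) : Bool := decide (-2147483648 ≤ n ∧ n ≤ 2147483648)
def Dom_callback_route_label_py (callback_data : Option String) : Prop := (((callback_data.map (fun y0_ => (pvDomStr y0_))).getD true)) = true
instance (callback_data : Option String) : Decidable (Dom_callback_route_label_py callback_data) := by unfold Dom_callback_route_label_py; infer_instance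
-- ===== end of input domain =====

-- B replaces A's exact-dict + linear scan over 57 prefix tuples by ONE merged route dict with
-- (route, desc) pair values, probed exactly and then at each colon boundary of the input, with the
-- label reassembled as route ++ " " ++ desc (alternative data structure; return value only).

-- ===== PORT A =====
def pvAUnknown : String := "callback.unknown 未匹配按钮"
def pvExactTable : List (String × String) := [
  ("cloud:querymenu", "cloud.querymenu 到期时间查询菜单"),
  ("cloud:list", "cloud.list 代理列表"),
  ("cloud:autorenewlist", "cloud.autorenewlist 自动续费列表"),
  ("cloud:queryip", "cloud.queryip IP查询到期"),
  ("profile:orders", "profile.orders 订单查询入口"),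
  ("profile:orders:cloud", "profile.orders.cloud 云服务器订单"),
  ("profile:cart", "profile.cart 购物车入口"),
  ("profile:balance_details", "profile.balance_details 余额明细"),
  ("profile:reminders", "profile.reminders 提醒列表"),
  ("profile:reminders:muteall", "profile.reminders.mute_all 一键关闭所有提醒"),
  ("profile:reminders:unmuteall", "profile.reminders.unmute_all 一键开启全部提醒"),
  ("profile:reminders:page", "profile.reminders.page 提醒列表分页"),
  ("profile:back_to_menu", "profile.back_to_menu 返回个人中心"),
  ("profile:back", "profile.back 返回主菜单"),
  ("profile:recharge", "profile.recharge 充值余额"),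
  ("profile:recharges", "profile.recharges 充值记录"),
  ("profile:monitors", "profile.monitors 地址监控"),
  ("custom:back", "custom.back 返回主菜单"),
  ("custom:regions", "custom.regions 定制地区"),
  ("custom:regions:more", "custom.regions.more 更多地区"),
  ("mon:add", "monitor.add 添加监控"),
  ("mon:list", "monitor.list 监控列表"),
  ("mon:back", "monitor.back 返回监控列表"),
  ("noop", "noop 无操作")]

def pvPrefixTable : List (String × String) := [
  ("cloud:orderdetail:", "cloud.orderdetail 云订单详情"),
  ("cloud:assetreinitconfirm:", "cloud.assetreinitconfirm 确认资产重建"),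
  ("cloud:assetinit:", "cloud.assetinit 资产重新安装"),
  ("cloud:assetaction:", "cloud.assetaction 资产操作"),
  ("cloud:assetdetail:", "cloud.assetdetail 人工代理详情"),
  ("cloud:detail:", "cloud.detail 代理详情"),
  ("cloud:list:page:", "cloud.list.page 代理列表分页"),
  ("cloud:autorenewlist:all:", "cloud.autorenewlist.all 自动续费批量开关"),
  ("cloud:autorenewlist:page:", "cloud.autorenewlist.page 自动续费列表分页"),
  ("cloud:autorenewlist:on:", "cloud.autorenewlist.on 开启自动续费"),
  ("cloud:autorenewlist:off:", "cloud.autorenewlist.off 关闭自动续费"),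
  ("cloud:queryip:page:", "cloud.queryip.page IP查询分页"),
  ("cloud:renewpay:", "cloud.renewpay 续费钱包支付"),
  ("cloud:renewwallet:", "cloud.renewwallet 自动续费钱包支付"),
  ("cloud:renew:", "cloud.renew 续费"),
  ("cloud:start:", "cloud.start 管理员开机"),
  ("cloud:autorenew:", "cloud.autorenew 自动续费开关"),
  ("cloud:delay:", "cloud.delay 延期"),
  ("cloud:mute:", "cloud.mute 关闭提醒"),
  ("cloud:ipport:default:", "cloud.ipport.default 更换IP默认端口"),
  ("cloud:ipport:custom:", "cloud.ipport.custom 更换IP自定义端口"),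
  ("cloud:ipregions:more:", "cloud.ipregions.more 更换IP更多地区"),
  ("cloud:ipregion:", "cloud.ipregion 更换IP选地区"),
  ("cloud:ip:", "cloud.ip 更换IP"),
  ("cloud:upgradepay:", "cloud.upgradepay 升级支付"),
  ("cloud:upgrade:", "cloud.upgrade 升级配置"),
  ("cloud:refundyes:", "cloud.refundyes 确认退款"),
  ("cloud:refund:", "cloud.refund 退款确认"),
  ("cloud:reinitconfirm:", "cloud.reinitconfirm 确认重新初始化"),
  ("cloud:reinit:", "cloud.reinit 重新安装/继续初始化"),
  ("profile:orders:cloud:page:", "profile.orders.cloud.page 云服务器订单分页"),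
  ("profile:reminders:ip:", "profile.reminders.ip IP提醒详情"),
  ("profile:reminders:order:", "profile.reminders.order 单IP生命周期提醒开关"),
  ("profile:reminders:auto:", "profile.reminders.auto 单IP自动续费开关"),
  ("profile:reminders:page:", "profile.reminders.page 提醒列表分页"),
  ("custom:region:", "custom.region 选择地区"),
  ("custom:plan:", "custom.plan 选择套餐"),
  ("custom:qty:", "custom.qty 选择数量"),
  ("custom:paypage:", "custom.paypage 支付页"),
  ("custom:qtycart:", "custom.qtycart 加入购物车"),
  ("custom:walletpay:", "custom.walletpay 钱包补付"),
  ("custom:wallet:", "custom.wallet 钱包支付币种"),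
  ("custom:currency:", "custom.currency 支付币种"),
  ("custom:balance:", "custom.balance 钱包支付"),
  ("custom:port:default:", "custom.port.default 默认端口"),
  ("custom:port:custom:", "custom.port.custom 自定义端口"),
  ("balance:detail:", "balance.detail 余额明细详情"),
  ("rcur:", "recharge.currency 充值币种"),
  ("rpage:", "recharge.page 充值分页"),
  ("rdetail:", "recharge.detail 充值详情"),
  ("mon:detail:", "monitor.detail 监控详情"),
  ("mon:toggle:", "monitor.toggle 监控开关"),
  ("mon:threshold:", "monitor.threshold 设置阈值"),
  ("mon:setthr:", "monitor.set_threshold 选择阈值币种"),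
  ("mon:delete:", "monitor.delete 删除监控"),
  ("mon:txd:", "monitor.transfer_detail 转账详情"),
  ("mon:resd:", "monitor.resource_detail 资源详情")]

-- `data = callback_data or ''`
def pvAData (callback_data : Option String) : String :=
  match callback_data with
  | none => ""
  | some s => if s = "" then "" else s

-- A's `for prefix, label in prefixes: if data.startswith(prefix): return label` loop
def pvALoop (data : String) : List (String × String) → String
  | [] => pvAUnknown
  | (p, l) :: rest => if PySem.Str.startswith data p then l else pvALoop data rest

def callback_route_label_py (callback_data : Option String) : String :=
  let data := pvAData callback_data
  match (PySem.Dict.ofList pvExactTable).get? data with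
  | some v => v
  | none => pvALoop data pvPrefixTable

-- ===== PORT B =====
def pvRouteRows : List (String × String × String) := [
  ⟨"cloud:querymenu", "cloud.querymenu", "到期时间查询菜单"⟩,
  ⟨"cloud:list", "cloud.list", "代理列表"⟩,
  ⟨"cloud:autorenewlist", "cloud.autorenewlist", "自动续费列表"⟩,
  ⟨"cloud:queryip", "cloud.queryip", "IP查询到期"⟩,
  ⟨"profile:orders", "profile.orders", "订单查询入口"⟩,
  ⟨"profile:orders:cloud", "profile.orders.cloud", "云服务器订单"⟩,
  ⟨"profile:cart", "profile.cart", "购物车入口"⟩,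
  ⟨"profile:balance_details", "profile.balance_details", "余额明细"⟩,
  ⟨"profile:reminders", "profile.reminders", "提醒列表"⟩,
  ⟨"profile:reminders:muteall", "profile.reminders.mute_all", "一键关闭所有提醒"⟩,
  ⟨"profile:reminders:unmuteall", "profile.reminders.unmute_all", "一键开启全部提醒"⟩,
  ⟨"profile:reminders:page", "profile.reminders.page", "提醒列表分页"⟩,
  ⟨"profile:back_to_menu", "profile.back_to_menu", "返回个人中心"⟩,
  ⟨"profile:back", "profile.back", "返回主菜单"⟩,
  ⟨"profile:recharge", "profile.recharge", "充值余额"⟩,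
  ⟨"profile:recharges", "profile.recharges", "充值记录"⟩,
  ⟨"profile:monitors", "profile.monitors", "地址监控"⟩,
  ⟨"custom:back", "custom.back", "返回主菜单"⟩,
  ⟨"custom:regions", "custom.regions", "定制地区"⟩,
  ⟨"custom:regions:more", "custom.regions.more", "更多地区"⟩,
  ⟨"mon:add", "monitor.add", "添加监控"⟩,
  ⟨"mon:list", "monitor.list", "监控列表"⟩,
  ⟨"mon:back", "monitor.back", "返回监控列表"⟩,
  ⟨"noop", "noop", "无操作"⟩,
  ⟨"cloud:orderdetail:", "cloud.orderdetail", "云订单详情"⟩,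
  ⟨"cloud:assetreinitconfirm:", "cloud.assetreinitconfirm", "确认资产重建"⟩,
  ⟨"cloud:assetinit:", "cloud.assetinit", "资产重新安装"⟩,
  ⟨"cloud:assetaction:", "cloud.assetaction", "资产操作"⟩,
  ⟨"cloud:assetdetail:", "cloud.assetdetail", "人工代理详情"⟩,
  ⟨"cloud:detail:", "cloud.detail", "代理详情"⟩,
  ⟨"cloud:list:page:", "cloud.list.page", "代理列表分页"⟩,
  ⟨"cloud:autorenewlist:all:", "cloud.autorenewlist.all", "自动续费批量开关"⟩,
  ⟨"cloud:autorenewlist:page:", "cloud.autorenewlist.page", "自动续费列表分页"⟩,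
  ⟨"cloud:autorenewlist:on:", "cloud.autorenewlist.on", "开启自动续费"⟩,
  ⟨"cloud:autorenewlist:off:", "cloud.autorenewlist.off", "关闭自动续费"⟩,
  ⟨"cloud:queryip:page:", "cloud.queryip.page", "IP查询分页"⟩,
  ⟨"cloud:renewpay:", "cloud.renewpay", "续费钱包支付"⟩,
  ⟨"cloud:renewwallet:", "cloud.renewwallet", "自动续费钱包支付"⟩,
  ⟨"cloud:renew:", "cloud.renew", "续费"⟩,
  ⟨"cloud:start:", "cloud.start", "管理员开机"⟩,
  ⟨"cloud:autorenew:", "cloud.autorenew", "自动续费开关"⟩,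
  ⟨"cloud:delay:", "cloud.delay", "延期"⟩,
  ⟨"cloud:mute:", "cloud.mute", "关闭提醒"⟩,
  ⟨"cloud:ipport:default:", "cloud.ipport.default", "更换IP默认端口"⟩,
  ⟨"cloud:ipport:custom:", "cloud.ipport.custom", "更换IP自定义端口"⟩,
  ⟨"cloud:ipregions:more:", "cloud.ipregions.more", "更换IP更多地区"⟩,
  ⟨"cloud:ipregion:", "cloud.ipregion", "更换IP选地区"⟩,
  ⟨"cloud:ip:", "cloud.ip", "更换IP"⟩,
  ⟨"cloud:upgradepay:", "cloud.upgradepay", "升级支付"⟩,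
  ⟨"cloud:upgrade:", "cloud.upgrade", "升级配置"⟩,
  ⟨"cloud:refundyes:", "cloud.refundyes", "确认退款"⟩,
  ⟨"cloud:refund:", "cloud.refund", "退款确认"⟩,
  ⟨"cloud:reinitconfirm:", "cloud.reinitconfirm", "确认重新初始化"⟩,
  ⟨"cloud:reinit:", "cloud.reinit", "重新安装/继续初始化"⟩,
  ⟨"profile:orders:cloud:page:", "profile.orders.cloud.page", "云服务器订单分页"⟩,
  ⟨"profile:reminders:ip:", "profile.reminders.ip", "IP提醒详情"⟩,
  ⟨"profile:reminders:order:", "profile.reminders.order", "单IP生命周期提醒开关"⟩,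
  ⟨"profile:reminders:auto:", "profile.reminders.auto", "单IP自动续费开关"⟩,
  ⟨"profile:reminders:page:", "profile.reminders.page", "提醒列表分页"⟩,
  ⟨"custom:region:", "custom.region", "选择地区"⟩,
  ⟨"custom:plan:", "custom.plan", "选择套餐"⟩,
  ⟨"custom:qty:", "custom.qty", "选择数量"⟩,
  ⟨"custom:paypage:", "custom.paypage", "支付页"⟩,
  ⟨"custom:qtycart:", "custom.qtycart", "加入购物车"⟩,
  ⟨"custom:walletpay:", "custom.walletpay", "钱包补付"⟩,
  ⟨"custom:wallet:", "custom.wallet", "钱包支付币种"⟩,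
  ⟨"custom:currency:", "custom.currency", "支付币种"⟩,
  ⟨"custom:balance:", "custom.balance", "钱包支付"⟩,
  ⟨"custom:port:default:", "custom.port.default", "默认端口"⟩,
  ⟨"custom:port:custom:", "custom.port.custom", "自定义端口"⟩,
  ⟨"balance:detail:", "balance.detail", "余额明细详情"⟩,
  ⟨"rcur:", "recharge.currency", "充值币种"⟩,
  ⟨"rpage:", "recharge.page", "充值分页"⟩,
  ⟨"rdetail:", "recharge.detail", "充值详情"⟩,
  ⟨"mon:detail:", "monitor.detail", "监控详情"⟩,
  ⟨"mon:toggle:", "monitor.toggle", "监控开关"⟩,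
  ⟨"mon:threshold:", "monitor.threshold", "设置阈值"⟩,
  ⟨"mon:setthr:", "monitor.set_threshold", "选择阈值币种"⟩,
  ⟨"mon:delete:", "monitor.delete", "删除监控"⟩,
  ⟨"mon:txd:", "monitor.transfer_detail", "转账详情"⟩,
  ⟨"mon:resd:", "monitor.resource_detail", "资源详情"⟩]

-- B's module-level `_ROUTES = { key: (route, desc), … }` dict literal
def pvRoutes : PySem.Dict String (String × String) := PySem.Dict.ofList pvRouteRows

def pvFallback : String × String := ("callback.unknown", "未匹配按钮")

-- B's `for i, ch in enumerate(data): if ch == ':': hit = _ROUTES.get(data[:i+1]); if hit is not None: break`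
-- (`data[:i+1]` is PySem.List.slice on data.toList; exact, since i ≥ 0 here)
def pvScan (data : List Char) : List (Int × Char) → Option (String × String)
  | [] => none
  | (i, ch) :: rest =>
      if ch = ':' then
        match pvRoutes.get? (String.ofList (PySem.List.slice data none (some (i + 1)))) with
        | some h => some h
        | none => pvScan data rest
      else pvScan data rest

def callback_route_label_py_alt (callback_data : Option String) : String :=
  let data : String := match callback_data with | none => "" | some s => if s = "" then "" else s
  let hit : Option (String × String) :=
    match pvRoutes.get? data with
    | some h => some h
    | none => pvScan data.toList (PySem.List.enumerate data.toList 0)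
  let rd := hit.getD pvFallback
  rd.1 ++ " " ++ rd.2

-- ===== PRECONDITION & SPEC =====
def Spec_callback_route_label_py (callback_data : Option String) (out : String) : Prop := out = callback_route_label_py_alt callback_data
instance (callback_data : Option String) (out : String) : Decidable (Spec_callback_route_label_py callback_data out) := by unfold Spec_callback_route_label_py; infer_instance

-- ===== CLAIM (what is proved, stated in full; the proofs are below) =====
def Claim_equal_callback_route_label_py : Prop := ∀ (callback_data : Option String), Dom_callback_route_label_py callback_data → Spec_callback_route_label_py callback_data (callback_route_label_py callback_data)

-- ===== LEMMAS AND PROOFS =====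

-- table facts, by kernel computation
set_option maxRecDepth 400000 in
set_option maxHeartbeats 4000000 in
lemma pv_rows_join : pvRouteRows.map (fun r => (r.1, r.2.1 ++ " " ++ r.2.2)) = pvExactTable ++ pvPrefixTable := by decide

set_option maxRecDepth 400000 in
set_option maxHeartbeats 4000000 in
lemma pv_routes_items : pvRoutes.items = pvRouteRows := by decide

set_option maxRecDepth 400000 in
set_option maxHeartbeats 4000000 in
lemma pv_routes_nodup : pvRoutes.keys.Nodup := by decide

set_option maxRecDepth 400000 in
set_option maxHeartbeats 4000000 in
lemma pv_exact_items : (PySem.Dict.ofList pvExactTable).items = pvExactTable := by decide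

set_option maxRecDepth 400000 in
set_option maxHeartbeats 4000000 in
lemma pv_exact_nodup : (PySem.Dict.ofList pvExactTable).keys.Nodup := by decide

set_option maxRecDepth 400000 in
set_option maxHeartbeats 4000000 in
lemma pv_nonnest : pvPrefixTable.Pairwise
    (fun p q => ¬ (p.1.toList <+: q.1.toList) ∧ ¬ (q.1.toList <+: p.1.toList)) := by decide

set_option maxRecDepth 400000 in
set_option maxHeartbeats 4000000 in
lemma pv_colon : ∀ p ∈ pvPrefixTable, p.1.toList ≠ [] ∧ p.1.toList.getLast? = some ':' := by decide

set_option maxRecDepth 400000 in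
set_option maxHeartbeats 4000000 in
lemma pv_exact_nocolon : ∀ p ∈ pvExactTable, p.1.toList.getLast? ≠ some ':' := by decide

lemma pv_fallback_join : pvFallback.1 ++ " " ++ pvFallback.2 = pvAUnknown := by decide

-- dict lookups are first (here: unique) matches in the literal tables
lemma pvR_get_iff {s : String} {rd : String × String} :
    pvRoutes.get? s = some rd ↔ (s, rd) ∈ pvRouteRows := by
  rw [PySem.Dict.get?_eq_some_iff_mem_items pvRoutes s rd pv_routes_nodup, pv_routes_items]

lemma pvE_get_iff {s v : String} :
    (PySem.Dict.ofList pvExactTable).get? s = some v ↔ (s, v) ∈ pvExactTable := by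
  rw [PySem.Dict.get?_eq_some_iff_mem_items _ s v pv_exact_nodup, pv_exact_items]

-- translating between B's rows and A's tables
lemma pv_rows_to_tab {s : String} {rd : String × String} (h : (s, rd) ∈ pvRouteRows) :
    (s, rd.1 ++ " " ++ rd.2) ∈ pvExactTable ++ pvPrefixTable := by
  rw [← pv_rows_join]
  exact List.mem_map_of_mem h

lemma pv_tab_to_rows {s l : String} (h : (s, l) ∈ pvExactTable ++ pvPrefixTable) :
    ∃ rd : String × String, (s, rd) ∈ pvRouteRows ∧ rd.1 ++ " " ++ rd.2 = l := by
  rw [← pv_rows_join] at h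
  obtain ⟨⟨k1, rd⟩, hr, he⟩ := List.mem_map.mp h
  have h1 : k1 = s := congrArg Prod.fst he
  exact ⟨rd, by rwa [h1] at hr, congrArg Prod.snd he⟩

-- at most one prefix key can be a prefix of the same string
lemma pv_unique (dataL : List Char) (p q : String × String) (hp : p ∈ pvPrefixTable)
    (hq : q ∈ pvPrefixTable) (hpd : p.1.toList <+: dataL) (hqd : q.1.toList <+: dataL) : p = q := by
  by_contra hne
  have hsymm : Symmetric (fun (p q : String × String) =>
      ¬ (p.1.toList <+: q.1.toList) ∧ ¬ (q.1.toList <+: p.1.toList)) := by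
    intro a b h; exact ⟨h.2, h.1⟩
  have h := pv_nonnest.forall hsymm hp hq hne
  rcases List.prefix_or_prefix_of_prefix hpd hqd with h1 | h1
  · exact h.1 h1
  · exact h.2 h1

-- A's loop when no listed prefix matches
lemma pv_aLoop_none (data : String) : ∀ L : List (String × String),
    (∀ p ∈ L, ¬ (p.1.toList <+: data.toList)) → pvALoop data L = pvAUnknown := by
  intro L
  induction L with
  | nil => intro _; rfl
  | cons hd tl ih =>
      intro h
      obtain ⟨a, b⟩ := hd
      have hna : ¬ (PySem.Str.startswith data a = true) := by
        simpa [PySem.Chars.startswith_iff] using h (a, b) (List.mem_cons_self ..)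
      simp only [pvALoop]
      rw [if_neg hna]
      exact ih (fun p hp => h p (List.mem_cons_of_mem _ hp))

-- A's loop when exactly one listed prefix matches
lemma pv_aLoop_some (data : String) (p : String × String) (hpd : p.1.toList <+: data.toList) :
    ∀ L : List (String × String), p ∈ L →
    (∀ q ∈ L, q.1.toList <+: data.toList → q = p) → pvALoop data L = p.2 := by
  intro L
  induction L with
  | nil => intro h; exact absurd h (List.not_mem_nil)
  | cons hd tl ih =>
      intro hmem huniq
      obtain ⟨a, b⟩ := hd
      by_cases hsw : PySem.Str.startswith data a = true
      · have hhd : a.toList <+: data.toList := by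
          simpa [PySem.Chars.startswith_iff] using hsw
        have hab : (a, b) = p := huniq (a, b) (List.mem_cons_self ..) hhd
        simp only [pvALoop]
        rw [if_pos hsw]
        exact congrArg Prod.snd hab
      · have hne : (a, b) ≠ p := by
          intro h; apply hsw
          rw [show a = p.1 from congrArg Prod.fst h]
          simpa [PySem.Chars.startswith_iff] using hpd
        have hmem' : p ∈ tl := by
          rcases List.mem_cons.mp hmem with h | h
          · exact absurd h.symm hne
          · exact h
        simp only [pvALoop]
        rw [if_neg hsw]
        exact ih hmem' (fun q hq => huniq q (List.mem_cons_of_mem _ hq))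

set_option maxRecDepth 400000 in
set_option maxHeartbeats 2000000 in
lemma pv_scan_cons (dataL : List Char) (tl : List (Int × Char)) (i : Int) (ch : Char) :
    pvScan dataL ((i, ch) :: tl) =
      (if ch = ':' then
        match pvRoutes.get? (String.ofList (PySem.List.slice dataL none (some (i + 1)))) with
        | some h => some h
        | none => pvScan dataL tl
      else pvScan dataL tl) := rfl

-- B's scan when every colon-boundary lookup misses
set_option maxRecDepth 100000 in
lemma pv_scan_none (dataL : List Char) : ∀ es : List (Int × Char),
    (∀ e ∈ es, e.2 = ':' → pvRoutes.get? (String.ofList (PySem.List.slice dataL none (some (e.1 + 1)))) = none) →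
    pvScan dataL es = none := by
  intro es
  induction es with
  | nil => intro _; rfl
  | cons e tl ih =>
      intro h
      obtain ⟨i, ch⟩ := e
      by_cases hc : ch = ':'
      · rw [pv_scan_cons, if_pos hc, h (i, ch) (List.mem_cons_self ..) hc]
        exact ih (fun e' he' => h e' (List.mem_cons_of_mem _ he'))
      · rw [pv_scan_cons, if_neg hc]
        exact ih (fun e' he' => h e' (List.mem_cons_of_mem _ he'))

-- B's scan when some colon boundary hits and every hit returns the same pair
set_option maxRecDepth 100000 in
lemma pv_scan_some (dataL : List Char) (rd : String × String) : ∀ es : List (Int × Char),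
    (∀ e ∈ es, e.2 = ':' → ∀ w, pvRoutes.get? (String.ofList (PySem.List.slice dataL none (some (e.1 + 1)))) = some w → w = rd) →
    (∃ e ∈ es, e.2 = ':' ∧ pvRoutes.get? (String.ofList (PySem.List.slice dataL none (some (e.1 + 1)))) = some rd) →
    pvScan dataL es = some rd := by
  intro es
  induction es with
  | nil => rintro _ ⟨e, he, _⟩; exact absurd he (List.not_mem_nil)
  | cons e tl ih =>
      rintro huniq ⟨e0, he0mem, he0c, he0get⟩
      obtain ⟨i, ch⟩ := e
      by_cases hc : ch = ':'
      · rw [pv_scan_cons, if_pos hc]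
        cases hget : pvRoutes.get? (String.ofList (PySem.List.slice dataL none (some (i + 1)))) with
        | some w =>
            rw [huniq (i, ch) (List.mem_cons_self ..) hc w hget]
        | none =>
            show pvScan dataL tl = some rd
            apply ih (fun e' he' => huniq e' (List.mem_cons_of_mem _ he'))
            rcases List.mem_cons.mp he0mem with h | h
            · rw [h] at he0get; rw [he0get] at hget; exact absurd hget (by simp)
            · exact ⟨e0, h, he0c, he0get⟩
      · rw [pv_scan_cons, if_neg hc]
        apply ih (fun e' he' => huniq e' (List.mem_cons_of_mem _ he'))
        rcases List.mem_cons.mp he0mem with h | h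
        · rw [h] at he0c; exact absurd he0c hc
        · exact ⟨e0, h, he0c, he0get⟩

-- each candidate B looks up is `take (k+1) dataL`, a prefix of dataL
lemma pv_cand_eq (dataL : List Char) (k : Nat) :
    PySem.List.slice dataL none (some ((k : Int) + 1)) = dataL.take (k + 1) := by
  rw [show ((k : Int) + 1) = ((k + 1 : Nat) : Int) by push_cast; ring]
  exact PySem.List.slice_to_natCast dataL (k + 1)

-- a hit at a colon boundary is a hit in A's prefix table
lemma pv_cand_mem (data : String) (k : Nat) (hk : k < data.toList.length)
    (hcol : data.toList[k] = ':') (w : String × String)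
    (hget : pvRoutes.get? (String.ofList (data.toList.take (k + 1))) = some w) :
    (String.ofList (data.toList.take (k + 1)), w.1 ++ " " ++ w.2) ∈ pvPrefixTable := by
  have htab := pv_rows_to_tab (pvR_get_iff.mp hget)
  rcases List.mem_append.mp htab with h | h
  · exfalso
    apply pv_exact_nocolon _ h
    have hlen : (data.toList.take (k + 1)).length = k + 1 := by
      rw [List.length_take]; omega
    simp only [String.toList_ofList, List.getLast?_eq_getElem?, hlen]
    simp
    rw [List.getElem?_eq_getElem hk, hcol]
  · exact h

-- the two lookup strategies agree on every data string
set_option maxRecDepth 400000 in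
set_option maxHeartbeats 4000000 in
lemma pv_core (data : String) :
    (match (PySem.Dict.ofList pvExactTable).get? data with
     | some v => v
     | none => pvALoop data pvPrefixTable) =
    (((match pvRoutes.get? data with
       | some h => some h
       | none => pvScan data.toList (PySem.List.enumerate data.toList 0)).getD pvFallback).1 ++ " " ++
     ((match pvRoutes.get? data with
       | some h => some h
       | none => pvScan data.toList (PySem.List.enumerate data.toList 0)).getD pvFallback).2) := by
  cases hE : (PySem.Dict.ofList pvExactTable).get? data with
  | some v =>
      obtain ⟨rd, hrd, hjoin⟩ :=
        pv_tab_to_rows (List.mem_append.mpr (Or.inl (pvE_get_iff.mp hE)))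
      have hR : pvRoutes.get? data = some rd := pvR_get_iff.mpr hrd
      rw [hR]
      exact hjoin.symm
  | none =>
      cases hR : pvRoutes.get? data with
      | some rd =>
          have htab := pv_rows_to_tab (pvR_get_iff.mp hR)
          have hpre : (data, rd.1 ++ " " ++ rd.2) ∈ pvPrefixTable := by
            rcases List.mem_append.mp htab with h | h
            · rw [← pvE_get_iff] at h; rw [hE] at h; exact absurd h (by simp)
            · exact h
          have hpd : (data, rd.1 ++ " " ++ rd.2).1.toList <+: data.toList := List.prefix_refl _
          exact pv_aLoop_some data _ hpd _ hpre
            (fun q hq hqd => pv_unique data.toList q _ hq hpre hqd hpd)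
      | none =>
          by_cases hm : ∃ p ∈ pvPrefixTable, p.1.toList <+: data.toList
          · obtain ⟨p, hp, hpd⟩ := hm
            have hA : pvALoop data pvPrefixTable = p.2 :=
              pv_aLoop_some data p hpd _ hp
                (fun q hq hqd => pv_unique data.toList q p hq hp hqd hpd)
            obtain ⟨rd, hrd, hjoin⟩ :=
              pv_tab_to_rows (List.mem_append.mpr (Or.inr hp))
            have hRp : pvRoutes.get? p.1 = some rd := pvR_get_iff.mpr hrd
            have hscan : pvScan data.toList (PySem.List.enumerate data.toList 0) = some rd := by
              apply pv_scan_some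
              · intro e he hec w hget
                obtain ⟨k, hk, hek⟩ := (PySem.List.mem_enumerate_iff _ _ _).mp he
                have he1 : e.1 = (k : Int) := by rw [hek]; simp
                rw [he1, pv_cand_eq] at hget
                have hcolk : data.toList[k] = ':' := by
                  have h2 := congrArg Prod.snd hek
                  rw [hec] at h2
                  exact h2.symm
                have hmemw := pv_cand_mem data k hk hcolk w hget
                have hprew : (String.ofList (data.toList.take (k + 1))).toList <+: data.toList := by
                  simp only [String.toList_ofList]
                  exact List.take_prefix _ _
                have heq := pv_unique data.toList _ p hmemw hp hprew hpd
                have hkey : String.ofList (data.toList.take (k + 1)) = p.1 := congrArg Prod.fst heq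
                rw [hkey, hRp] at hget
                exact (Option.some.inj hget).symm
              · obtain ⟨hne, hlast⟩ := pv_colon p hp
                have hlen1 : 1 ≤ p.1.toList.length := by
                  cases h : p.1.toList with
                  | nil => exact absurd h hne
                  | cons a l => simp
                set n := p.1.toList.length with hn
                have hnle : n ≤ data.toList.length := hpd.length_le
                have hklt : n - 1 < data.toList.length := by omega
                have hgetlast : p.1.toList[n - 1]'(by omega) = ':' := by
                  rw [List.getLast?_eq_getElem?] at hlast
                  obtain ⟨_, h2⟩ := List.getElem?_eq_some_iff.mp hlast
                  exact h2
                have hcol : data.toList[n - 1]'hklt = ':' := by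
                  have hpq := hpd.getElem (show n - 1 < p.1.toList.length by omega)
                  exact hpq.symm.trans hgetlast
                refine ⟨(((n - 1 : Nat) : Int), data.toList[n - 1]'hklt), ?_, hcol, ?_⟩
                · exact (PySem.List.mem_enumerate_iff _ _ _).mpr ⟨n - 1, hklt, by simp⟩
                · show pvRoutes.get? (String.ofList (PySem.List.slice data.toList none (some (((n - 1 : Nat) : Int) + 1)))) = some rd
                  rw [pv_cand_eq, show n - 1 + 1 = n by omega,
                      show data.toList.take n = p.1.toList from (List.prefix_iff_eq_take.mp hpd).symm]
                  rw [show String.ofList p.1.toList = p.1 by simp]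
                  exact hRp
            rw [hscan, hA]
            exact hjoin.symm
          · simp only [not_exists, not_and] at hm
            have hA : pvALoop data pvPrefixTable = pvAUnknown :=
              pv_aLoop_none data pvPrefixTable hm
            have hscan : pvScan data.toList (PySem.List.enumerate data.toList 0) = none := by
              apply pv_scan_none
              intro e he hec
              obtain ⟨k, hk, hek⟩ := (PySem.List.mem_enumerate_iff _ _ _).mp he
              have he1 : e.1 = (k : Int) := by rw [hek]; simp
              rw [he1, pv_cand_eq]
              cases hget : pvRoutes.get? (String.ofList (data.toList.take (k + 1))) with
              | none => rfl
              | some w =>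
                  have hcolk : data.toList[k] = ':' := by
                    have h2 := congrArg Prod.snd hek
                    rw [hec] at h2
                    exact h2.symm
                  have hmemw := pv_cand_mem data k hk hcolk w hget
                  exact ((hm _ hmemw) (by simpa using List.take_prefix (k + 1) data.toList)).elim
            rw [hscan, hA]
            exact pv_fallback_join.symm

-- ===== VERDICT (by name: the statement is the Claim_ definition above) =====
theorem callback_route_label_py_spec : Claim_equal_callback_route_label_py := by
  intro cd _
  unfold Spec_callback_route_label_py
  show callback_route_label_py cd = callback_route_label_py_alt cd
  unfold callback_route_label_py callback_route_label_py_alt pvAData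
  exact pv_core _
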